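-- pv_equiv track=rewrite | github.com/takapdayon/atcoder | abc/AtCoderBeginnerContest076/B.py | doubleork
-- ===== SOURCE A (Python) =====
-- def doubleork(n, k):
--
--     ans = 1
--
--     for i in range(n):
--         if ans * 2 < ans + k:
--             ans *= 2
--         else:
--             ans += k
--
--     return ans
-- ===== SOURCE B (Python) =====
-- def doubleork(n, k):
--     rem = n if n > 0 else 0
--     ans = 1
--     # doubling phase: while ans < k (i.e. 2*ans < ans+k), double; at most O(log k) steps
--     while rem > 0 and ans < k:
--         ans *= 2
--         rem -= 1
--     if rem == 0:
--         return ans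
--     if k >= 0:
--         # ans >= k >= 0 stays >= k after each +k: all remaining steps add k
--         return ans + k * rem
--     # k < 0: adding k while ans >= k; t = number of add steps before ans drops below k
--     t = (ans - k) // (-k) + 1
--     if t >= rem:
--         return ans + k * rem
--     ans += k * t
--     rem -= t
--     # ans < k < 0: doubling forever
--     return ans * 2 ** rem
-- ===== Notes on version B (the rewrite author's own statement) =====
-- stated objective: faster
-- what changed: Replaces the n-step simulation by a three-phase closed form: double while ans<k (O(log k) steps), then for k>=0 add k*(remaining) in one multiplication, and for k<0 compute the number of add steps by floor division and finish with one power of two.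
import Mathlib
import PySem

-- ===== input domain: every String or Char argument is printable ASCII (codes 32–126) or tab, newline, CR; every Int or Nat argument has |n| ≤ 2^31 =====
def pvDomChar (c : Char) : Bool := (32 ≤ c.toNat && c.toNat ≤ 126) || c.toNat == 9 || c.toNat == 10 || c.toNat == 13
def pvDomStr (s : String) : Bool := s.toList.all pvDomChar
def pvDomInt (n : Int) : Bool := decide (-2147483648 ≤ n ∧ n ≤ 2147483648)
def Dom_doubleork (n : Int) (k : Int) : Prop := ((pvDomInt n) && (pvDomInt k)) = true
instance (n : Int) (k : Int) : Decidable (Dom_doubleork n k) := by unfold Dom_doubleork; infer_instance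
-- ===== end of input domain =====

-- B replaces the O(n) step-by-step simulation by a three-phase closed form (doubling phase,
-- then arithmetic for the remaining steps): objective = faster (asymptotic, O(log k)).

-- ===== PORT A =====
-- for i in range(n): ans = ans*2 if ans*2 < ans+k else ans+k
def doubleork (n : Int) (k : Int) : Int :=
  (PySem.List.pyRange 0 n 1).foldl
    (fun ans _ => if ans * 2 < ans + k then ans * 2 else ans + k) 1

-- ===== PORT B =====
-- while rem > 0 and ans < k: ans *= 2; rem -= 1   (rem ≥ 0 throughout, so it is carried as a Nat fuel)
def doubleorkDoublePhase (k : Int) : Nat → Int → Nat × Int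
  | 0, ans => (0, ans)
  | r + 1, ans => if ans < k then doubleorkDoublePhase k r (ans * 2) else (r + 1, ans)

def doubleork_alt (n : Int) (k : Int) : Int :=
  let rem0 : Nat := (if n > 0 then n else 0).toNat
  let p := doubleorkDoublePhase k rem0 1
  let rem : Int := (p.1 : Int)
  let ans := p.2
  if rem = 0 then ans
  else if k ≥ 0 then ans + k * rem
  else
    let t := PySem.Int.floordiv (ans - k) (-k) + 1
    if t ≥ rem then ans + k * rem
    else (ans + k * t) * 2 ^ (rem - t).toNat   -- 2 ** (rem - t) with rem - t > 0

-- ===== PRECONDITION & SPEC =====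
def Spec_doubleork (n : Int) (k : Int) (out : Int) : Prop := out = doubleork_alt n k
instance (n : Int) (k : Int) (out : Int) : Decidable (Spec_doubleork n k out) := by unfold Spec_doubleork; infer_instance

-- ===== CLAIM (what is proved, stated in full; the proofs are below) =====
def Claim_equal_doubleork : Prop := ∀ (n : Int) (k : Int), Dom_doubleork n k → Spec_doubleork n k (doubleork n k)

-- ===== LEMMAS AND PROOFS =====

-- A's loop body iterated m times, as structural recursion (proof-side mirror of the fold).
def aIter (k : Int) : Nat → Int → Int
  | 0, ans => ans
  | m + 1, ans => aIter k m (if ans * 2 < ans + k then ans * 2 else ans + k)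

lemma foldl_eq_aIter (k : Int) (l : List Int) (ans : Int) :
    l.foldl (fun a _ => if a * 2 < a + k then a * 2 else a + k) ans = aIter k l.length ans := by
  induction l generalizing ans with
  | nil => rfl
  | cons x xs ih => simp [List.foldl, aIter, ih]

lemma doubleork_eq_aIter (n k : Int) : doubleork n k = aIter k n.toNat 1 := by
  unfold doubleork
  rw [foldl_eq_aIter, PySem.List.length_pyRange_one]
  norm_num

-- k ≥ 0 and ans ≥ k: every step adds k.
lemma aIter_add_phase_nonneg (k : Int) (hk : 0 ≤ k) :
    ∀ (m : Nat) (ans : Int), k ≤ ans → aIter k m ans = ans + k * m := by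
  intro m
  induction m with
  | zero => intro ans _; simp [aIter]
  | succ m ih =>
    intro ans h
    have hc : ¬ ans * 2 < ans + k := by omega
    simp only [aIter, if_neg hc]
    rw [ih (ans + k) (by omega)]
    push_cast; ring

-- k < 0 and ans < k: every step doubles.
lemma aIter_double_forever (k : Int) (hk : k < 0) :
    ∀ (m : Nat) (ans : Int), ans < k → aIter k m ans = ans * 2 ^ m := by
  intro m
  induction m with
  | zero => intro ans _; simp [aIter]
  | succ m ih =>
    intro ans h
    have hc : ans * 2 < ans + k := by omega
    simp only [aIter, if_pos hc]
    rw [ih (ans * 2) (by omega)]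
    ring

-- k < 0 and ans ≥ k: exactly t = (ans-k)//(-k)+1 add steps, then doubling forever.
lemma aIter_add_phase_neg (k : Int) (hk : k < 0) :
    ∀ (m : Nat) (ans : Int), k ≤ ans →
      aIter k m ans =
        (let t := PySem.Int.floordiv (ans - k) (-k) + 1
         if t ≥ (m : Int) then ans + k * m else (ans + k * t) * 2 ^ ((m : Int) - t).toNat) := by
  have hpos : (0:Int) < -k := by omega
  intro m
  induction m with
  | zero =>
    intro ans h
    have ht : 0 ≤ PySem.Int.floordiv (ans - k) (-k) := by
      rw [PySem.Int.floordiv_eq_ediv_of_pos hpos]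
      exact Int.ediv_nonneg (by omega) (by omega)
    simp only [aIter, Nat.cast_zero]
    rw [if_pos (by omega)]
    ring
  | succ m ih =>
    intro ans h
    have hc : ¬ ans * 2 < ans + k := by omega
    simp only [aIter, if_neg hc]
    by_cases h2 : k ≤ ans + k
    · -- another add step remains possible; t decreases by exactly one
      have hstep : PySem.Int.floordiv (ans - k) (-k) = PySem.Int.floordiv ans (-k) + 1 := by
        rw [PySem.Int.floordiv_eq_ediv_of_pos hpos, PySem.Int.floordiv_eq_ediv_of_pos hpos]
        have : ans - k = ans + 1 * (-k) := by ring
        rw [this, Int.add_mul_ediv_right _ _ (by omega : (-k) ≠ 0)]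
      rw [ih (ans + k) h2]
      simp only [hstep]
      have harg : ans + k - k = ans := by ring
      rw [harg]
      by_cases hge : PySem.Int.floordiv ans (-k) + 1 ≥ (m : Int)
      · rw [if_pos hge, if_pos (by push_cast; omega)]
        push_cast; ring
      · rw [if_neg hge, if_neg (by push_cast; omega)]
        have : ((m : Int) + 1 - (PySem.Int.floordiv ans (-k) + 1 + 1)).toNat
             = ((m : Int) - (PySem.Int.floordiv ans (-k) + 1)).toNat := by omega
        push_cast
        rw [this]
        ring
    · -- ans + k < k : this was the last add step, t = 1, afterwards doubling forever
      have ht0 : PySem.Int.floordiv (ans - k) (-k) = 0 := by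
        rw [PySem.Int.floordiv_eq_ediv_of_pos hpos]
        exact Int.ediv_eq_zero_of_lt (by omega) (by omega)
      rw [aIter_double_forever k hk m (ans + k) (by omega), ht0]
      by_cases hm : (0:Int) + 1 ≥ (m : Int) + 1
      · have hm0 : m = 0 := by omega
        subst hm0
        rw [if_pos (by norm_num)]
        norm_num
      · rw [if_neg (by push_cast at hm ⊢; omega)]
        have : ((m : Int) + 1 - 1).toNat = m := by omega
        push_cast
        rw [this]
        ring

-- the doubling phase mirrors A's first steps, and afterwards rem = 0 or ans ≥ k
lemma aIter_double_phase (k : Int) :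
    ∀ (m : Nat) (ans : Int),
      aIter k m ans = aIter k (doubleorkDoublePhase k m ans).1 (doubleorkDoublePhase k m ans).2 ∧
      ((doubleorkDoublePhase k m ans).1 = 0 ∨ k ≤ (doubleorkDoublePhase k m ans).2) := by
  intro m
  induction m with
  | zero => intro ans; exact ⟨rfl, Or.inl rfl⟩
  | succ m ih =>
    intro ans
    by_cases h : ans < k
    · have hc : ans * 2 < ans + k := by omega
      simp only [doubleorkDoublePhase, if_pos h, aIter, if_pos hc]
      exact ih (ans * 2)
    · simp only [doubleorkDoublePhase, if_neg h]
      exact ⟨trivial, Or.inr (by omega)⟩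

-- ===== VERDICT (by name: the statement is the Claim_ definition above) =====
theorem doubleork_spec : Claim_equal_doubleork := by
  intro n k _
  unfold Spec_doubleork doubleork_alt
  have hrem0 : (if n > 0 then n else 0).toNat = n.toNat := by split_ifs <;> omega
  rw [doubleork_eq_aIter, hrem0]
  obtain ⟨heq, hdisj⟩ := aIter_double_phase k n.toNat 1
  set p := doubleorkDoublePhase k n.toNat 1 with hp
  rw [heq]
  by_cases h0 : (p.1 : Int) = 0
  · have : p.1 = 0 := by omega
    rw [this, if_pos (by simpa using h0)]
    rfl
  · rw [if_neg h0]
    have hk2 : k ≤ p.2 := by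
      rcases hdisj with h | h
      · exact absurd (by simp [h]) h0
      · exact h
    by_cases hk : k ≥ 0
    · rw [if_pos hk]
      exact aIter_add_phase_nonneg k hk p.1 p.2 hk2
    · rw [if_neg hk]
      exact aIter_add_phase_neg k (by omega) p.1 p.2 hk2
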